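-- pv_equiv track=rewrite | github.com/RitikaKulshresth/python-practice | span_of_An_Array.py | Span_of_an_Array
-- ===== SOURCE A (Python) =====
-- def Span_of_an_Array(nums):
--     max=nums[0]
--     min=nums[0]
--     for i in range(0,len(nums)):
--         if nums[i]>max:
--             max=nums[i]
--
--         if nums[i]<min:
--             min=nums[i]
--
--     return (max-min)
-- ===== SOURCE B (Python) =====
-- def Span_of_an_Array(nums):
--     s = sorted(nums)
--     return s[-1] - s[0]
-- ===== Notes on version B (the rewrite author's own statement) =====
-- stated objective: simpler
-- what changed: Replaces the single-pass running max/min loop by sorting the list and subtracting its first element from its last.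
import Mathlib
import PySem

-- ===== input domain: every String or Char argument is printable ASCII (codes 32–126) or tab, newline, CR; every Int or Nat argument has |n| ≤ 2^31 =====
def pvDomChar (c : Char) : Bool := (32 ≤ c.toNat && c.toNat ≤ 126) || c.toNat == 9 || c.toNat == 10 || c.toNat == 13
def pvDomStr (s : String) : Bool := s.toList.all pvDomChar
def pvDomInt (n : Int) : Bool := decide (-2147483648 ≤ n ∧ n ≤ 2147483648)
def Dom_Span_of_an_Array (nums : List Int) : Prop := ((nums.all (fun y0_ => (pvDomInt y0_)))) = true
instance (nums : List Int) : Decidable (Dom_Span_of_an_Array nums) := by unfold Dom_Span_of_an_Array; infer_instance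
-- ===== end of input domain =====

-- B sorts the list and subtracts the first sorted element from the last, instead of A's
-- running max/min index loop; objective: simpler.


-- ===== PORT A =====
def Span_of_an_Array (nums : List Int) : Int :=
  match nums with
  | [] => 0  -- unreachable: Python raises IndexError at nums[0]; excluded by Pre_
  | h :: t =>
    let p := (PySem.List.pyRange 0 ((h :: t).length : Int) 1).foldl
      (fun (st : Int × Int) i =>
        let x := PySem.List.pyGetD (h :: t) i 0
        (if x > st.1 then x else st.1, if x < st.2 then x else st.2)) (h, h)
    p.1 - p.2

-- ===== PORT B =====
def Span_of_an_Array_alt (nums : List Int) : Int :=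
  let s := PySem.List.sorted nums (fun x => x) false
  match PySem.List.pyGet? s (-1), PySem.List.pyGet? s 0 with
  | some a, some b => a - b
  | _, _ => 0  -- unreachable: Python raises IndexError on the empty list; excluded by Pre_

-- ===== PRECONDITION & SPEC =====
-- Pre_ excludes only the empty list, on which both Pythons raise IndexError.
def Pre_Span_of_an_Array (nums : List Int) : Prop := nums ≠ []
instance (nums : List Int) : Decidable (Pre_Span_of_an_Array nums) := by unfold Pre_Span_of_an_Array; infer_instance
def pvWitness_Span_of_an_Array : List Int := [3, 1, 4, 1, 5]

def Spec_Span_of_an_Array (nums : List Int) (out : Int) : Prop := out = Span_of_an_Array_alt nums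
instance (nums : List Int) (out : Int) : Decidable (Spec_Span_of_an_Array nums out) := by unfold Spec_Span_of_an_Array; infer_instance

-- ===== CLAIM (what is proved, stated in full; the proofs are below) =====
def Claim_equal_Span_of_an_Array : Prop := ∀ (nums : List Int), Dom_Span_of_an_Array nums → Pre_Span_of_an_Array nums → Spec_Span_of_an_Array nums (Span_of_an_Array nums)

-- ===== LEMMAS AND PROOFS =====

-- A's loop body, as a fold step.
def pvStep (st : Int × Int) (x : Int) : Int × Int :=
  (if x > st.1 then x else st.1, if x < st.2 then x else st.2)

lemma pvFold_ub (xs : List Int) : ∀ st : Int × Int,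
    st.1 ≤ (xs.foldl pvStep st).1 ∧ ∀ x ∈ xs, x ≤ (xs.foldl pvStep st).1 := by
  induction xs with
  | nil => simp
  | cons y ys ih =>
    intro st
    have h := ih (pvStep st y)
    constructor
    · refine le_trans ?_ h.1
      simp [pvStep]; split <;> omega
    · intro x hx
      rcases List.mem_cons.mp hx with rfl | hx
      · refine le_trans ?_ h.1
        simp [pvStep]; split <;> omega
      · exact h.2 x hx

lemma pvFold_lb (xs : List Int) : ∀ st : Int × Int,
    (xs.foldl pvStep st).2 ≤ st.2 ∧ ∀ x ∈ xs, (xs.foldl pvStep st).2 ≤ x := by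
  induction xs with
  | nil => simp
  | cons y ys ih =>
    intro st
    have h := ih (pvStep st y)
    constructor
    · refine le_trans h.1 ?_
      simp [pvStep]; split <;> omega
    · intro x hx
      rcases List.mem_cons.mp hx with rfl | hx
      · refine le_trans h.1 ?_
        simp [pvStep]; split <;> omega
      · exact h.2 x hx

lemma pvFold_mem_fst (xs : List Int) : ∀ st : Int × Int,
    (xs.foldl pvStep st).1 = st.1 ∨ (xs.foldl pvStep st).1 ∈ xs := by
  induction xs with
  | nil => simp
  | cons y ys ih =>
    intro st
    rcases ih (pvStep st y) with h | h
    · rw [List.foldl_cons, h]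
      simp only [pvStep]
      split
      · exact Or.inr (List.mem_cons_self)
      · exact Or.inl rfl
    · exact Or.inr (List.mem_cons_of_mem _ h)

lemma pvFold_mem_snd (xs : List Int) : ∀ st : Int × Int,
    (xs.foldl pvStep st).2 = st.2 ∨ (xs.foldl pvStep st).2 ∈ xs := by
  induction xs with
  | nil => simp
  | cons y ys ih =>
    intro st
    rcases ih (pvStep st y) with h | h
    · rw [List.foldl_cons, h]
      simp only [pvStep]
      split
      · exact Or.inr (List.mem_cons_self)
      · exact Or.inl rfl
    · exact Or.inr (List.mem_cons_of_mem _ h)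

-- In a (· ≤ ·)-pairwise list, every element is bounded by the last one.
lemma pvLe_getLast : ∀ (l : List Int), l.Pairwise (· ≤ ·) →
    ∀ (hne : l ≠ []) (x : Int), x ∈ l → x ≤ l.getLast hne := by
  intro l
  induction l with
  | nil => intro _ hne; exact absurd rfl hne
  | cons y ys ih =>
    intro hp hne x hx
    rcases List.pairwise_cons.mp hp with ⟨hy, hys⟩
    cases ys with
    | nil => simp_all
    | cons z zs =>
      rcases List.mem_cons.mp hx with rfl | hx
      · have := ih hys (by simp) z (List.mem_cons_self)
        have hz : x ≤ z := hy z (List.mem_cons_self)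
        rw [List.getLast_cons (by simp)]
        exact le_trans hz this
      · rw [List.getLast_cons (by simp)]
        exact ih hys (by simp) x hx

lemma pvGet_neg_one (l : List Int) (hne : l ≠ []) :
    PySem.List.pyGet? l (-1) = some (l.getLast hne) := by
  have hlen : 1 ≤ l.length := List.length_pos_iff.mpr hne |>.nat_succ_le
  simp only [PySem.List.pyGet?, PySem.List.pyIdx?]
  rw [if_neg (by omega), if_pos (by omega)]
  simp only [Option.bind_some]
  rw [List.getLast_eq_getElem, List.getElem?_eq_getElem (by omega)]
  norm_num

-- ===== VERDICT (by name: the statement is the Claim_ definition above) =====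
theorem Span_of_an_Array_spec : Claim_equal_Span_of_an_Array := by
  intro nums _ hpre
  unfold Spec_Span_of_an_Array
  match nums, hpre with
  | h :: t, _ =>
    unfold Span_of_an_Array Span_of_an_Array_alt
    simp only
    rw [PySem.List.foldl_pyRange_zero_pyGetD' (h :: t) 0
      (fun st x => (if x > st.1 then x else st.1, if x < st.2 then x else st.2)) (h, h)]
    set xs := h :: t with hxs
    set s := PySem.List.sorted xs (fun x => x) false with hs
    have hperm : s.Perm xs := PySem.List.sorted_perm xs (fun x => x) false
    have hsne : s ≠ [] := by
      intro hnil
      have := hperm.length_eq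
      rw [hnil, hxs] at this
      simp at this
    have hpw : s.Pairwise (· ≤ ·) := PySem.List.sorted_pairwise xs (fun x => x)
    obtain ⟨m, r, hmr⟩ := List.exists_cons_of_ne_nil hsne
    -- evaluate the two indexings
    rw [pvGet_neg_one s hsne]
    have h0 : PySem.List.pyGet? s 0 = some m := by
      rw [hmr]; simp [PySem.List.pyGet?, PySem.List.pyIdx?]
    rw [h0]
    simp only
    -- A's fold, under the name pvStep
    have hstep : (fun (st : Int × Int) x => (if x > st.1 then x else st.1, if x < st.2 then x else st.2)) = pvStep := by
      funext st x; rfl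
    rw [hstep]
    set p := xs.foldl pvStep (h, h) with hp
    -- max component equals the last of the sorted list
    have hmemF : p.1 ∈ xs := by
      rcases pvFold_mem_fst xs (h, h) with h1 | h1
      · rw [← hp] at h1; rw [h1, hxs]; exact List.mem_cons_self
      · rw [← hp] at h1; exact h1
    have hmemS : p.2 ∈ xs := by
      rcases pvFold_mem_snd xs (h, h) with h1 | h1
      · rw [← hp] at h1; rw [h1, hxs]; exact List.mem_cons_self
      · rw [← hp] at h1; exact h1
    have hub := (pvFold_ub xs (h, h)).2
    have hlb := (pvFold_lb xs (h, h)).2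
    have hlast_mem : s.getLast hsne ∈ xs := hperm.mem_iff.mp (List.getLast_mem hsne)
    have hm_mem : m ∈ xs := hperm.mem_iff.mp (by rw [hmr]; exact List.mem_cons_self)
    have e1 : p.1 = s.getLast hsne := by
      apply le_antisymm
      · exact pvLe_getLast s hpw hsne p.1 (hperm.mem_iff.mpr hmemF)
      · exact hub _ hlast_mem
    have e2 : p.2 = m := by
      apply le_antisymm
      · exact hlb _ hm_mem
      · exact PySem.List.key_head_sorted_le xs (fun x => x) (hs ▸ hmr) p.2 hmemS
    rw [e1, e2]
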